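-- pv_equiv track=rewrite | github.com/SoufianLa/hackerrankps | andela_test/run_1.py | shortestSubstring
-- ===== SOURCE A (Python) =====
-- def shortestSubstring(givenString):
--     j = 0
--     index = 0
--     l = list(givenString)
--     s = set(l)
--     for c in l:
--         if len(s) == 0:
--             break
--         if c in s:
--             s.remove(c)
--         index += 1
--     string_to_optimize = givenString[:index]
--     if string_to_optimize.count(string_to_optimize[j]) > 1:
--         s = string_to_optimize.replace(string_to_optimize[j], "", 1)
--         return len(s)
--     return len(string_to_optimize)
-- ===== SOURCE B (Python) =====
-- def shortestSubstring(givenString):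
--     first = {}
--     for i, c in enumerate(givenString):
--         if c not in first:
--             first[c] = i
--     index = max(first.values()) + 1 if first else 0
--     string_to_optimize = givenString[:index]
--     if string_to_optimize.count(string_to_optimize[0]) > 1:
--         return len(string_to_optimize.replace(string_to_optimize[0], "", 1))
--     return len(string_to_optimize)
-- ===== Notes on version B (the rewrite author's own statement) =====
-- stated objective: simpler
-- what changed: Replaces A's shrinking-set scan with early break by a single pass that records each character's first-occurrence index in a dict and takes max(first.values())+1 as the prefix length; the tail count/replace fix-up is kept verbatim.
import Mathlib
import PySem

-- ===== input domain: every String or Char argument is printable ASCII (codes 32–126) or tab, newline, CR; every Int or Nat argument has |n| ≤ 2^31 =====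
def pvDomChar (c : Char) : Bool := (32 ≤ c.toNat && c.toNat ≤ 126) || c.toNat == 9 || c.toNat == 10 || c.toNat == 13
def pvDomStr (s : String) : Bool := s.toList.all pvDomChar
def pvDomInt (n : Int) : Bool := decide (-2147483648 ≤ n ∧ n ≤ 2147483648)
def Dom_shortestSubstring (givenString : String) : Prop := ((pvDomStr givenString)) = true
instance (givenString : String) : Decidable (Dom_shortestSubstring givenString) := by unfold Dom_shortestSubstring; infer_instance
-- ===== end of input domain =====

-- B replaces A's shrinking-set scan by a first-occurrence dict whose max value gives the
-- prefix length directly (objective: simpler decomposition); the tail fix-up is kept verbatim.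

-- ===== PORT A =====
-- the 'for c in l' loop with its 'break': s is the Python set, index the counter
def pvLoopA : List Char → PySem.Set Char → Int → Int
  | [], _, index => index
  | c :: rest, s, index =>
    if s.length = 0 then index
    else
      -- 'if c in s: s.remove(c)' — remove? is some here since c ∈ s, so getD never defaults
      pvLoopA rest (if PySem.Set.contains s c then (PySem.Set.remove? s c).getD s else s)
        (index + 1)

-- the tail block shared verbatim by A and B: givenString[:index], count/replace fix-up
-- (str.replace(c0, "", 1) with the single char c0 present removes its first occurrence:
--  PySem.List.remove?; exact since count > 1 guarantees presence)
def pvTailA (l : List Char) (index : Int) : Int :=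
  let string_to_optimize := PySem.List.slice l none (some index)
  match PySem.List.pyGet? string_to_optimize 0 with
  | none => 0   -- Python raises IndexError here (empty string); excluded by Pre_
  | some c0 =>
    if 1 < PySem.Chars.count string_to_optimize [c0] then
      (((PySem.List.remove? string_to_optimize c0).getD string_to_optimize).length : Int)
    else (string_to_optimize.length : Int)

def shortestSubstring (givenString : String) : Int :=
  let l := givenString.toList
  pvTailA l (pvLoopA l (PySem.Set.ofList l) 0)

-- ===== PORT B =====
-- 'for i, c in enumerate(givenString): if c not in first: first[c] = i'
def pvFirstB (l : List Char) : PySem.Dict Char Int :=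
  (PySem.List.enumerate l 0).foldl
    (fun d p => if d.contains p.2 then d else d.insert p.2 p.1) PySem.Dict.empty

-- same tail block as A's (Source B copies it verbatim)
def pvTailB (l : List Char) (index : Int) : Int :=
  let string_to_optimize := PySem.List.slice l none (some index)
  match PySem.List.pyGet? string_to_optimize 0 with
  | none => 0   -- Python raises IndexError here (empty string); excluded by Pre_
  | some c0 =>
    if 1 < PySem.Chars.count string_to_optimize [c0] then
      (((PySem.List.remove? string_to_optimize c0).getD string_to_optimize).length : Int)
    else (string_to_optimize.length : Int)

def shortestSubstring_alt (givenString : String) : Int :=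
  let l := givenString.toList
  -- 'index = max(first.values()) + 1 if first else 0'
  let index : Int :=
    match PySem.List.max? (pvFirstB l).values (fun x => x) with
    | none => 0
    | some m => m + 1
  pvTailB l index

-- ===== PRECONDITION & SPEC =====
-- Pre_ excludes only the empty string, on which both A and B raise IndexError
-- at string_to_optimize[0].
def Pre_shortestSubstring (givenString : String) : Prop := givenString ≠ ""
instance (givenString : String) : Decidable (Pre_shortestSubstring givenString) := by
  unfold Pre_shortestSubstring; infer_instance

def pvWitness_shortestSubstring : String := "ab"

def Spec_shortestSubstring (givenString : String) (out : Int) : Prop := out = shortestSubstring_alt givenString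
instance (givenString : String) (out : Int) : Decidable (Spec_shortestSubstring givenString out) := by unfold Spec_shortestSubstring; infer_instance

-- ===== CLAIM (what is proved, stated in full; the proofs are below) =====
def Claim_equal_shortestSubstring : Prop := ∀ (givenString : String), Dom_shortestSubstring givenString → Pre_shortestSubstring givenString → Spec_shortestSubstring givenString (shortestSubstring givenString)

-- ===== LEMMAS AND PROOFS =====

-- spec of both prefix computations: the (absolute) positions, starting from i, of the
-- characters of r whose first overall occurrence is there (seen = chars already seen)
def pvNew : List Char → List Char → Int → List Int
  | _, [], _ => []
  | seen, c :: r, i =>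
    if c ∈ seen then pvNew seen r (i + 1) else i :: pvNew (c :: seen) r (i + 1)

lemma pvNew_congr_seen (r : List Char) : ∀ (seen seen' : List Char) (i : Int),
    (∀ x, x ∈ seen ↔ x ∈ seen') → pvNew seen r i = pvNew seen' r i := by
  induction r with
  | nil => intro seen seen' i _; rfl
  | cons c r ih =>
    intro seen seen' i h
    simp only [pvNew]
    by_cases hc : c ∈ seen
    · rw [if_pos hc, if_pos ((h c).mp hc), ih _ _ _ h]
    · rw [if_neg hc, if_neg (fun hc' => hc ((h c).mpr hc'))]
      congr 1
      exact ih _ _ _ (fun x => by simp [h x])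

lemma pvNew_eq_nil (r : List Char) : ∀ (seen : List Char) (i : Int),
    (∀ c ∈ r, c ∈ seen) → pvNew seen r i = [] := by
  induction r with
  | nil => intro _ _ _; rfl
  | cons c r ih =>
    intro seen i h
    simp only [pvNew, if_pos (h c (by simp))]
    exact ih seen (i + 1) (fun x hx => h x (by simp [hx]))

lemma pvNew_ne_nil (r : List Char) : ∀ (seen : List Char) (i : Int) (x : Char),
    x ∈ r → x ∉ seen → pvNew seen r i ≠ [] := by
  induction r with
  | nil => intro _ _ _ h _; simp at h
  | cons c r ih =>
    intro seen i x hx hxs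
    simp only [pvNew]
    by_cases hc : c ∈ seen
    · rw [if_pos hc]
      rcases List.mem_cons.mp hx with rfl | hx'
      · exact absurd hc hxs
      · exact ih seen (i + 1) x hx' hxs
    · rw [if_neg hc]; simp

-- A's loop computes (last first-occurrence position)+1, default the running index
lemma pvLoopA_eq (r : List Char) : ∀ (seen : List Char) (s : PySem.Set Char) (i : Int),
    s.Nodup → (∀ x, x ∈ s ↔ x ∈ r ∧ x ∉ seen) →
    pvLoopA r s i = (((pvNew seen r i).getLast?).map (· + 1)).getD i := by
  induction r with
  | nil =>
    intro seen s i _ _; rfl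
  | cons c r ih =>
    intro seen s i hnd hmem
    simp only [pvLoopA]
    by_cases hs : s.length = 0
    · rw [if_pos hs]
      have hnil : pvNew seen (c :: r) i = [] := by
        apply pvNew_eq_nil
        intro x hx
        by_contra hxs
        have : x ∈ s := (hmem x).mpr ⟨hx, hxs⟩
        simp [List.length_eq_zero_iff.mp hs] at this
      rw [hnil]; rfl
    · rw [if_neg hs]
      obtain ⟨y, hy⟩ := List.exists_mem_of_ne_nil s (by
        intro h; exact hs (by simp [h]))
      obtain ⟨hyr, hyseen⟩ := (hmem y).mp hy
      by_cases hc : c ∈ seen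
      · -- c already seen: it is not in s, the set is unchanged
        have hcnot : c ∉ s := fun h => ((hmem c).mp h).2 hc
        have hcs : PySem.Set.contains s c = false := by
          rw [← Bool.not_eq_true, PySem.Set.contains_iff s c]
          exact hcnot
        rw [hcs]
        simp only [Bool.false_eq_true, if_false]
        have hmem' : ∀ x, x ∈ s ↔ x ∈ r ∧ x ∉ seen := by
          intro x
          rw [hmem x]
          constructor
          · rintro ⟨hx, hxs⟩
            rcases List.mem_cons.mp hx with rfl | hx'
            · exact absurd hc hxs
            · exact ⟨hx', hxs⟩
          · rintro ⟨hx, hxs⟩; exact ⟨by simp [hx], hxs⟩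
        rw [ih seen s (i + 1) hnd hmem']
        have hy' : y ∈ r := by
          rcases List.mem_cons.mp hyr with rfl | h
          · exact absurd hc hyseen
          · exact h
        have hnn := pvNew_ne_nil r seen (i + 1) y hy' hyseen
        simp only [pvNew, if_pos hc]
        cases hL : pvNew seen r (i + 1) with
        | nil => exact absurd hL hnn
        | cons a t => rfl
      · -- c is new: it is in s and gets removed
        have hcmem : c ∈ s := (hmem c).mpr ⟨by simp, hc⟩
        have hcs : PySem.Set.contains s c = true := (PySem.Set.contains_iff s c).mpr hcmem
        rw [hcs, if_pos rfl, PySem.Set.remove?_of_mem hcmem]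
        simp only [Option.getD_some]
        have hnd' := PySem.Set.nodup_discard s c hnd
        have hmem' : ∀ x, x ∈ s.discard c ↔ x ∈ r ∧ x ∉ (c :: seen) := by
          intro x
          rw [PySem.Set.mem_discard, hmem x]
          constructor
          · rintro ⟨⟨hx, hxs⟩, hne⟩
            rcases List.mem_cons.mp hx with rfl | hx'
            · exact absurd rfl hne
            · exact ⟨hx', by simp [hxs, hne]⟩
          · rintro ⟨hx, hxs⟩
            simp only [List.mem_cons, not_or] at hxs
            exact ⟨⟨by simp [hx], hxs.2⟩, hxs.1⟩
        rw [ih (c :: seen) (s.discard c) (i + 1) hnd' hmem']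
        simp only [pvNew, if_neg hc]
        cases hL : pvNew (c :: seen) r (i + 1) with
        | nil => simp
        | cons a t =>
          rw [List.getLast?_cons_cons]
          cases hgl : (a :: t).getLast? with
          | none => simp [List.getLast?_eq_none_iff] at hgl
          | some b => simp

-- B's dict fold: values = the first-occurrence positions, keys acting as 'seen'
lemma pvFirstB_fold (r : List Char) : ∀ (d : PySem.Dict Char Int) (i : Int),
    d.keys.Nodup →
    ((PySem.List.enumerate r i).foldl
      (fun d p => if d.contains p.2 then d else d.insert p.2 p.1) d).values
      = d.values ++ pvNew d.keys r i := by
  induction r with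
  | nil => intro d i _; simp [PySem.List.enumerate_nil, pvNew]
  | cons c r ih =>
    intro d i hnd
    rw [PySem.List.enumerate_cons]
    simp only [List.foldl_cons]
    by_cases hc : d.contains c = true
    · rw [if_pos hc, ih d (i + 1) hnd]
      have : c ∈ d.keys := (PySem.Dict.contains_iff_mem_keys d c).mp hc
      simp only [pvNew, if_pos this]
    · rw [if_neg hc]
      have hcf : d.contains c = false := by revert hc; cases d.contains c <;> simp
      have hnd' : (d.insert c i).keys.Nodup := PySem.Dict.nodup_keys_insert d c i hnd
      rw [ih (d.insert c i) (i + 1) hnd']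
      have hkeys : (d.insert c i).keys = d.keys ++ [c] :=
        PySem.Dict.keys_insert_of_not_contains d i hcf
      have hvals : (d.insert c i).values = d.values ++ [i] := by
        have := PySem.Dict.items_insert_of_not_contains d i hcf
        simp only [PySem.Dict.values, this, List.map_append, List.map_cons, List.map_nil]
      have hck : c ∉ d.keys := fun h =>
        absurd ((PySem.Dict.contains_iff_mem_keys d c).mpr h) (by simp [hcf])
      have hnew : pvNew (d.insert c i).keys r (i + 1) = pvNew (c :: d.keys) r (i + 1) := by
        apply pvNew_congr_seen
        intro x; simp [hkeys, or_comm]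
      rw [hvals, hnew]
      simp only [pvNew, if_neg hck]
      simp

-- a fold of max over pvNew, started at j ≤ i, lands on the last element
lemma pvNew_foldl_max (r : List Char) : ∀ (seen : List Char) (i j : Int), j ≤ i →
    (pvNew seen r i).foldl max j = ((pvNew seen r i).getLast?).getD j := by
  induction r with
  | nil => intro _ _ _ _; rfl
  | cons c r ih =>
    intro seen i j hj
    simp only [pvNew]
    by_cases hc : c ∈ seen
    · rw [if_pos hc]; exact ih seen (i + 1) j (by omega)
    · rw [if_neg hc]
      simp only [List.foldl_cons]
      rw [max_eq_right hj, ih (c :: seen) (i + 1) i (by omega)]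
      cases hL : pvNew (c :: seen) r (i + 1) with
      | nil => simp
      | cons a t =>
        rw [List.getLast?_cons_cons]
        cases hgl : (a :: t).getLast? with
        | none => simp [List.getLast?_eq_none_iff] at hgl
        | some b => rfl

-- max of pvNew is its last element (the list is produced in increasing order)
lemma pvNew_max (r : List Char) : ∀ (seen : List Char) (i : Int),
    PySem.List.max? (pvNew seen r i) (fun x => x) = (pvNew seen r i).getLast? := by
  induction r with
  | nil => intro _ _; rfl
  | cons c r ih =>
    intro seen i
    simp only [pvNew]
    by_cases hc : c ∈ seen
    · rw [if_pos hc]; exact ih seen (i + 1)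
    · rw [if_neg hc, PySem.List.max?_id_cons,
        pvNew_foldl_max r (c :: seen) (i + 1) i (by omega)]
      cases hL : pvNew (c :: seen) r (i + 1) with
      | nil => simp
      | cons a t =>
        rw [List.getLast?_cons_cons]
        cases hgl : (a :: t).getLast? with
        | none => simp [List.getLast?_eq_none_iff] at hgl
        | some b => rfl

-- both prefix lengths agree, on every list of characters
lemma pvIndex_eq (l : List Char) :
    pvLoopA l (PySem.Set.ofList l) 0
      = (match PySem.List.max? (pvFirstB l).values (fun x => x) with
         | none => 0
         | some m => m + 1) := by
  have hA : pvLoopA l (PySem.Set.ofList l) 0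
      = (((pvNew [] l 0).getLast?).map (· + 1)).getD 0 := by
    apply pvLoopA_eq
    · exact PySem.Set.nodup_ofList l
    · intro x; rw [PySem.Set.mem_ofList]; simp
  have hB : (pvFirstB l).values = pvNew [] l 0 := by
    have h := pvFirstB_fold l PySem.Dict.empty 0 (by simp [pysem])
    simpa [pvFirstB, PySem.Dict.empty] using h
  rw [hA, hB, pvNew_max]
  cases (pvNew [] l 0).getLast? <;> simp

-- ===== VERDICT (by name: the statement is the Claim_ definition above) =====
theorem shortestSubstring_spec : Claim_equal_shortestSubstring := by
  intro givenString _ _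
  show shortestSubstring givenString = shortestSubstring_alt givenString
  simp only [shortestSubstring, shortestSubstring_alt]
  rw [pvIndex_eq givenString.toList]
  rfl
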